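-- pv_equiv track=rewrite | github.com/pypi-data/pypi-mirror-97 | packages/skoolkit/skoolkit-8.4.tar.gz/skoolkit-8.4/skoolkit/bin2tap.py | _make_tap_block
-- ===== SOURCE A (Python) =====
-- def _get_word(word):
--     return (word % 256, word // 256)
--
-- def _make_tap_block(data, header=False):
--     if header:
--         flag = 0
--     else:
--         flag = 255
--     block = [0, 0, flag]
--     block.extend(data)
--     parity = 0
--     for b in block:
--         parity ^= b
--     block.append(parity)
--     block[:2] = _get_word(len(block) - 2)
--     return block
-- ===== SOURCE B (Python) =====
-- def _xor_all(xs):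
--     # balanced divide-and-conquer XOR reduction (recursion depth O(log n))
--     if len(xs) == 0:
--         return 0
--     if len(xs) == 1:
--         return xs[0]
--     m = len(xs) // 2
--     return _xor_all(xs[:m]) ^ _xor_all(xs[m:])
--
-- def _make_tap_block(data, header=False):
--     data = list(data)
--     flag = 0 if header else 255
--     n = len(data) + 2
--     return [n % 256, n // 256, flag] + data + [flag ^ _xor_all(data)]
-- ===== Notes on version B (the rewrite author's own statement) =====
-- stated objective: alternative
-- what changed: B computes the checksum by a balanced divide-and-conquer XOR reduction over data (correct because XOR is associative and commutative) and assembles the block in a single concatenation with the length word derived from len(data)+2, instead of A's placeholder bytes, linear whole-block parity loop and slice patch.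
import Mathlib
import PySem

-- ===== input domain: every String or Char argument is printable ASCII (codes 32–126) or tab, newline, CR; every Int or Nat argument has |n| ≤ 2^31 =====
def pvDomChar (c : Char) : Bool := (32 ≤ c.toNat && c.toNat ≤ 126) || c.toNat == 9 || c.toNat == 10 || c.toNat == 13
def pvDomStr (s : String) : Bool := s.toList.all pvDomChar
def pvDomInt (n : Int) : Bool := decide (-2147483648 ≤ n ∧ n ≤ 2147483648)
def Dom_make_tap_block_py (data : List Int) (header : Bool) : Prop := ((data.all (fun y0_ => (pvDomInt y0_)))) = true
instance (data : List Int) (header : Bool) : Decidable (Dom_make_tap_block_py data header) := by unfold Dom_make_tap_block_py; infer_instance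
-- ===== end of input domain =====

-- B assembles the block in one concatenation (length word from len(data)+2) and computes the
-- checksum by a balanced divide-and-conquer XOR reduction over data, instead of A's placeholder
-- bytes, linear whole-block parity loop and slice patch; correctness rests on XOR associativity.


-- ===== PORT A =====
-- _get_word(word) = (word % 256, word // 256)
def get_word_py (word : Int) : Int × Int :=
  (PySem.Int.mod word 256, PySem.Int.floordiv word 256)

def make_tap_block_py (data : List Int) (header : Bool) : List Int :=
  let flag : Int := if header then 0 else 255
  let block : List Int := [0, 0, flag] ++ data          -- block = [0,0,flag]; block.extend(data)
  let parity : Int := block.foldl (fun p b => PySem.Int.bxor p b) 0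
  let block2 : List Int := block ++ [parity]            -- block.append(parity)
  let w := get_word_py ((block2.length : Int) - 2)      -- block[:2] = _get_word(len(block)-2)
  [w.1, w.2] ++ block2.drop 2

-- ===== PORT B =====
-- _xor_all: balanced divide-and-conquer XOR reduction; xs[:m]/xs[m:] → take/drop,
-- len(xs)//2 with len(xs) ≥ 0 is exactly Nat division; xs[0] in the length-1 branch is xs.headI.
def xor_all_py (xs : List Int) : Int :=
  if xs.length = 0 then 0
  else if xs.length = 1 then xs.headI
  else
    let m := xs.length / 2
    PySem.Int.bxor (xor_all_py (xs.take m)) (xor_all_py (xs.drop m))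
termination_by xs.length
decreasing_by
  all_goals simp only [List.length_take, List.length_drop]; omega

def make_tap_block_py_alt (data : List Int) (header : Bool) : List Int :=
  let flag : Int := if header then 0 else 255
  let n : Int := (data.length : Int) + 2
  [PySem.Int.mod n 256, PySem.Int.floordiv n 256, flag] ++ data
    ++ [PySem.Int.bxor flag (xor_all_py data)]

-- ===== PRECONDITION & SPEC =====
def Spec_make_tap_block_py (data : List Int) (header : Bool) (out : List Int) : Prop := out = make_tap_block_py_alt data header
instance (data : List Int) (header : Bool) (out : List Int) : Decidable (Spec_make_tap_block_py data header out) := by unfold Spec_make_tap_block_py; infer_instance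

-- ===== CLAIM (what is proved, stated in full; the proofs are below) =====
def Claim_equal_make_tap_block_py : Prop := ∀ (data : List Int) (header : Bool), Dom_make_tap_block_py data header → Spec_make_tap_block_py data header (make_tap_block_py data header)

-- ===== LEMMAS AND PROOFS =====

theorem bxor_eq_ixor (a b : Int) : PySem.Int.bxor a b = Int.xor a b := by
  unfold PySem.Int.bxor
  rcases a with m | m <;> rcases b with n | n <;>
    simp [Int.xor, Int.negSucc_eq] <;> omega

theorem ixor_assoc (a b c : Int) : Int.xor (Int.xor a b) c = Int.xor a (Int.xor b c) := by
  rcases a with m | m <;> rcases b with n | n <;> rcases c with k | k <;>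
    simp [Int.xor, Nat.xor_assoc]

theorem bxor_assoc (a b c : Int) :
    PySem.Int.bxor (PySem.Int.bxor a b) c = PySem.Int.bxor a (PySem.Int.bxor b c) := by
  simp [bxor_eq_ixor, ixor_assoc]

theorem bxor_zero_left (b : Int) : PySem.Int.bxor 0 b = b := by
  rw [PySem.Int.bxor_comm]; exact PySem.Int.bxor_zero b

-- Pulling the accumulator out of a left XOR fold.
theorem foldl_bxor_acc (xs : List Int) (a : Int) :
    xs.foldl (fun p b => PySem.Int.bxor p b) a
      = PySem.Int.bxor a (xs.foldl (fun p b => PySem.Int.bxor p b) 0) := by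
  induction xs generalizing a with
  | nil => simp
  | cons b t ih =>
      simp only [List.foldl]
      rw [ih (PySem.Int.bxor a b), ih (PySem.Int.bxor 0 b), bxor_zero_left, bxor_assoc]

theorem foldl_bxor_append (l1 l2 : List Int) :
    (l1 ++ l2).foldl (fun p b => PySem.Int.bxor p b) 0
      = PySem.Int.bxor (l1.foldl (fun p b => PySem.Int.bxor p b) 0)
          (l2.foldl (fun p b => PySem.Int.bxor p b) 0) := by
  rw [List.foldl_append, foldl_bxor_acc]

-- The divide-and-conquer reduction computes the same XOR as a linear left fold.
theorem xor_all_eq_foldl (xs : List Int) :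
    xor_all_py xs = xs.foldl (fun p b => PySem.Int.bxor p b) 0 := by
  fun_induction xor_all_py xs with
  | case1 xs h0 =>
      rw [List.length_eq_zero_iff.mp h0]; rfl
  | case2 xs h0 h1 =>
      rcases List.length_eq_one_iff.mp h1 with ⟨x, rfl⟩
      simp [List.foldl, bxor_zero_left]
  | case3 xs h0 h1 m ih1 ih2 =>
      rw [ih1, ih2, ← foldl_bxor_append, List.take_append_drop]

-- ===== VERDICT (by name: the statement is the Claim_ definition above) =====
theorem make_tap_block_py_spec : Claim_equal_make_tap_block_py := by
  intro data header _
  unfold Spec_make_tap_block_py make_tap_block_py make_tap_block_py_alt get_word_py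
  simp only [List.foldl_append, List.foldl, xor_all_eq_foldl]
  rw [foldl_bxor_acc data]
  simp only [bxor_zero_left, PySem.Int.bxor_zero, List.length_append, List.length_cons,
    List.drop, List.cons_append, List.nil_append, List.length_nil]
  have h : (↑(data.length + (0 + 1) + 1 + 1 + 1) : Int) - 2 = ↑data.length + 2 := by
    push_cast; ring
  rw [h]
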